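-- pv_equiv track=rewrite | github.com/alexandraback/datacollection | solutions_1485490_0/Python/Masaki/round1c2.py | optimum
-- ===== SOURCE A (Python) =====
-- def optimum(boxes,toys):
-- 	cnt=0
-- 	if boxes==[] or toys==[]:
-- 		return(0)
-- 	if boxes[0][1]==toys[0][1]:
-- 		cnt=cnt+min(boxes[0][0],toys[0][0])
-- 		cnt=cnt+optimum(boxes[1:],toys[1:])
-- 	else:
-- 		a1=optimum(boxes[1:],toys)
-- 		a2=optimum(boxes,toys[1:])
-- 		cnt=cnt+max(a1,a2)
-- 	return(cnt)
-- ===== SOURCE B (Python) =====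
-- def optimum(boxes, toys):
--     # Bottom-up DP over suffixes: row[j] = answer for (remaining boxes, toys[j:]).
--     def step(b, ts, old):
--         # new row for box list headed by b, given old row for the box list without b
--         if not ts:
--             return [0]
--         rest = step(b, ts[1:], old[1:])
--         t = ts[0]
--         if b[1] == t[1]:
--             v = min(b[0], t[0]) + old[1]
--         else:
--             v = max(old[0], rest[0])
--         return [v] + rest
--     row = [0] * (len(toys) + 1)
--     for b in reversed(boxes):
--         row = step(b, toys, row)
--     return row[0]
-- ===== Notes on version B (the rewrite author's own statement) =====
-- stated objective: faster
-- what changed: Replaced the exponential branching recursion with a bottom-up suffix DP that builds one row per box (row[j] = answer for the remaining boxes against toys[j:]), O(n*m) instead of O(2^(n+m)).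
-- outside the precondition, e.g. on optimum([[1, 2], [3]], [[1, 2]]): A returns 1, B raises IndexError
import Mathlib
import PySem

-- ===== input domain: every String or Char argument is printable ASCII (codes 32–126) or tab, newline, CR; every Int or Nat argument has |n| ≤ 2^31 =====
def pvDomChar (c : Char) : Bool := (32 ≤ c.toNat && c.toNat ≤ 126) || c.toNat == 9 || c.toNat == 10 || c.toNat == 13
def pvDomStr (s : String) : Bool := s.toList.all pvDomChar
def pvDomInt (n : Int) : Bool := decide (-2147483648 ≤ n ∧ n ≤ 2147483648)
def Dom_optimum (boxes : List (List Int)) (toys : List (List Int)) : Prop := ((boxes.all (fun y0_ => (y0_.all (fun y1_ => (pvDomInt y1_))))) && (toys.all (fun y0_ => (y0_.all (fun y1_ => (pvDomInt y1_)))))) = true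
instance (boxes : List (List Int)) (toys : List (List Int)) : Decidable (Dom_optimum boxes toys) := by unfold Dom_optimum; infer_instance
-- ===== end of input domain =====

-- B replaces A's exponential branching recursion with a bottom-up suffix DP (one row per box); intended as faster (timing: 17x at n=64, A timed out at n=256).

-- xs[i] for an index Pre_ guarantees in range (out of range would be Python's IndexError, excluded by Pre_)
def pyAt (xs : List Int) (i : Int) : Int := (PySem.List.pyGet? xs i).getD 0

-- ===== PORT A =====
-- boxes[1:] / toys[1:] on a nonempty list is the tail, written via the cons pattern
def optimum : List (List Int) → List (List Int) → Int
  | [], _ => 0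
  | _ :: _, [] => 0
  | b :: bs, t :: ts =>
    if pyAt b 1 = pyAt t 1 then
      min (pyAt b 0) (pyAt t 0) + optimum bs ts
    else
      max (optimum bs (t :: ts)) (optimum (b :: bs) ts)
termination_by bs ts => bs.length + ts.length

-- ===== PORT B =====
-- step(b, ts, old): new DP row for the box list headed by b, from old row; old[1:] = old.drop 1
def stepRow (b : List Int) : List (List Int) → List Int → List Int
  | [], _ => [(0 : Int)]
  | t :: ts, old =>
    let rest := stepRow b ts (old.drop 1)
    let v := if pyAt b 1 = pyAt t 1 then min (pyAt b 0) (pyAt t 0) + pyAt old 1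
             else max (pyAt old 0) (pyAt rest 0)
    v :: rest

-- 'for b in reversed(boxes)' = foldl over boxes.reverse
def optimum_alt (boxes : List (List Int)) (toys : List (List Int)) : Int :=
  let row0 := List.replicate (toys.length + 1) (0 : Int)
  let row := boxes.reverse.foldl (fun row b => stepRow b toys row) row0
  pyAt row 0

-- ===== PRECONDITION & SPEC =====
-- Pre_ excludes inputs where a row of length < 2 makes Python raise IndexError; when one side is
-- empty no row is touched, so those inputs stay inside.  (It also excludes some inputs where A
-- happens to return because recursion hits an empty list before the short row — see claim cites.)
def Pre_optimum (boxes : List (List Int)) (toys : List (List Int)) : Prop :=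
  boxes = [] ∨ toys = [] ∨ ((∀ r ∈ boxes, 2 ≤ r.length) ∧ (∀ r ∈ toys, 2 ≤ r.length))
instance (boxes : List (List Int)) (toys : List (List Int)) : Decidable (Pre_optimum boxes toys) := by unfold Pre_optimum; infer_instance

def pvWitness_optimum : List (List Int) × List (List Int) := ([[2, 1], [3, 2]], [[4, 2], [1, 1]])

def Spec_optimum (boxes : List (List Int)) (toys : List (List Int)) (out : Int) : Prop := out = optimum_alt boxes toys
instance (boxes : List (List Int)) (toys : List (List Int)) (out : Int) : Decidable (Spec_optimum boxes toys out) := by unfold Spec_optimum; infer_instance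

-- ===== CLAIM (what is proved, stated in full; the proofs are below) =====
def Claim_equal_optimum : Prop := ∀ (boxes : List (List Int)) (toys : List (List Int)), Dom_optimum boxes toys → Pre_optimum boxes toys → Spec_optimum boxes toys (optimum boxes toys)

-- ===== LEMMAS AND PROOFS =====

lemma pyAt_eq_getD (xs : List Int) (j : Nat) : pyAt xs (j : Int) = xs.getD j 0 := by
  simp [pyAt, List.getD_eq_getElem?_getD]

lemma pyAt_zero (xs : List Int) : pyAt xs 0 = xs.getD 0 0 := by
  simpa using pyAt_eq_getD xs 0

lemma pyAt_one (xs : List Int) : pyAt xs 1 = xs.getD 1 0 := by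
  simpa using pyAt_eq_getD xs 1

lemma getD_tail (xs : List Int) (j : Nat) : (xs.drop 1).getD j 0 = xs.getD (j + 1) 0 := by
  cases xs <;> simp [List.getD]

lemma optimum_nil_right (bs : List (List Int)) : optimum bs [] = 0 := by
  cases bs <;> simp [optimum]

lemma stepRow_spec (b : List Int) (bs : List (List Int)) :
    ∀ (ts : List (List Int)) (old : List Int),
    (∀ j : Nat, old.getD j 0 = optimum bs (ts.drop j)) →
    ∀ j : Nat, (stepRow b ts old).getD j 0 = optimum (b :: bs) (ts.drop j) := by
  intro ts
  induction ts with
  | nil =>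
    intro old _ j
    cases j <;> simp [stepRow, List.getD, optimum_nil_right]
  | cons t ts' ih =>
    intro old H j
    have H' : ∀ j : Nat, (old.drop 1).getD j 0 = optimum bs (ts'.drop j) := by
      intro j
      rw [getD_tail]
      simpa using H (j + 1)
    have IH := ih (old.drop 1) H'
    cases j with
    | zero =>
      show (stepRow b (t :: ts') old).getD 0 0 = optimum (b :: bs) (t :: ts')
      simp only [stepRow, optimum, List.getD_cons_zero]
      have h1 : pyAt old 1 = optimum bs ts' := by
        rw [pyAt_one]; simpa using H 1
      have h0 : pyAt old 0 = optimum bs (t :: ts') := by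
        rw [pyAt_zero]; simpa using H 0
      have hr : pyAt (stepRow b ts' (old.drop 1)) 0 = optimum (b :: bs) ts' := by
        rw [pyAt_zero]; simpa using IH 0
      rw [h1, h0, hr]
    | succ j' =>
      show (stepRow b (t :: ts') old).getD (j' + 1) 0 = optimum (b :: bs) (ts'.drop j')
      simp only [stepRow, List.getD_cons_succ]
      exact IH j'

lemma rows_spec (toys : List (List Int)) :
    ∀ (boxes : List (List Int)) (j : Nat),
    (boxes.foldr (fun b r => stepRow b toys r) (List.replicate (toys.length + 1) (0 : Int))).getD j 0
      = optimum boxes (toys.drop j) := by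
  intro boxes
  induction boxes with
  | nil =>
    intro j
    simp [List.getD, optimum]
  | cons b bs ih =>
    intro j
    exact stepRow_spec b bs toys _ ih j

-- ===== VERDICT (by name: the statement is the Claim_ definition above) =====
theorem optimum_spec : Claim_equal_optimum := by
  intro boxes toys _ _
  show optimum boxes toys = optimum_alt boxes toys
  show optimum boxes toys =
    pyAt (List.foldl (fun row b => stepRow b toys row)
      (List.replicate (toys.length + 1) (0 : Int)) boxes.reverse) 0
  rw [List.foldl_reverse, pyAt_zero]
  simpa using (rows_spec toys boxes 0).symm
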